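-- pv_equiv track=rewrite | github.com/StyxOo/python-ai-article-topic-evaluater | data_generator.py | get_topic_word_data
-- ===== SOURCE A (Python) =====
-- def get_topic_word_data(articles):
--     data = {}
--     for article in articles:
--         for topic in article['topics']:
--             if topic not in data:
--                 data[topic] = {}
--             for word in article['body']:
--                 if word in data[topic]:
--                     data[topic][word] += 1
--                 else:
--                     data[topic][word] = 1
--     return data
-- ===== SOURCE B (Python) =====
-- def get_topic_word_data(articles):
--     data = {}
--     for article in articles:
--         topics = article['topics']
--         if not topics:
--             continue
--         # build the article's word histogram once
--         counts = {}
--         for word in article['body']: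
--             counts[word] = counts.get(word, 0) + 1
--         # distribute it to every topic of the article
--         for topic in topics:
--             if topic not in data:
--                 data[topic] = {}
--             bucket = data[topic]
--             for word, c in counts.items():
--                 bucket[word] = bucket.get(word, 0) + c
--     return data
-- ===== Notes on version B (the rewrite author's own statement) =====
-- stated objective: faster
-- what changed: B computes each article's word histogram once and then adds it into every topic's bucket (build-then-distribute), instead of rescanning the whole body separately for every topic of the article.
import Mathlib
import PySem

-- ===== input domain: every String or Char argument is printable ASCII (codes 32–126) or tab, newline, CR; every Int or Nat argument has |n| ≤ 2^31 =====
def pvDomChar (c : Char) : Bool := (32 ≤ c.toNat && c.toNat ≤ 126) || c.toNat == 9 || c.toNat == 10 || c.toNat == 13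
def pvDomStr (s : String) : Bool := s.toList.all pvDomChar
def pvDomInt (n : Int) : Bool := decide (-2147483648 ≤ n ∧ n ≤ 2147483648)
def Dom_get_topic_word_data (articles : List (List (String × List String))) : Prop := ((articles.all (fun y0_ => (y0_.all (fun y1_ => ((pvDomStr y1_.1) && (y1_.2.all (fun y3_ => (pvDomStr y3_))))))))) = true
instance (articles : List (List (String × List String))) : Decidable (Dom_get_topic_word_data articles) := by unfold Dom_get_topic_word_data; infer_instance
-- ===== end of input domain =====

-- B builds each article's word histogram once and then adds it into every topic's bucket,
-- instead of rescanning the body once per topic (objective: faster).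


-- ===== PORT A =====
-- A: for each article, for each topic, ensure data[topic], then rescan the whole body bumping counts.
def get_topic_word_data (articles : List (List (String × List String))) : List (String × List (String × Int)) :=
  let data := articles.foldl (fun data article =>
    (((PySem.Dict.mk article).get? "topics").getD []).foldl (fun data topic =>
      let data := if data.contains topic then data else data.insert topic PySem.Dict.empty
      (((PySem.Dict.mk article).get? "body").getD []).foldl (fun data word =>
        let inner := data.getD topic PySem.Dict.empty
        let inner := if inner.contains word then inner.modify word 0 (· + 1) else inner.insert word 1
        data.insert topic inner) data) data)
    (PySem.Dict.empty : PySem.Dict String (PySem.Dict String Int))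
  data.items.map (fun p => (p.1, p.2.items))

-- ===== PORT B =====
-- B: per article, build counts over the body once, then merge counts into each topic's bucket.
def get_topic_word_data_alt (articles : List (List (String × List String))) : List (String × List (String × Int)) :=
  let data := articles.foldl (fun data article =>
    let topics := ((PySem.Dict.mk article).get? "topics").getD []
    if topics.isEmpty then data
    else
      let counts := (((PySem.Dict.mk article).get? "body").getD []).foldl
        (fun c w => c.insert w (c.getD w 0 + 1)) (PySem.Dict.empty : PySem.Dict String Int)
      topics.foldl (fun data topic =>
        let data := if data.contains topic then data else data.insert topic PySem.Dict.empty
        let bucket := data.getD topic PySem.Dict.empty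
        let bucket := counts.items.foldl (fun b p => b.insert p.1 (b.getD p.1 0 + p.2)) bucket
        data.insert topic bucket) data)
    (PySem.Dict.empty : PySem.Dict String (PySem.Dict String Int))
  data.items.map (fun p => (p.1, p.2.items))

-- ===== PRECONDITION & SPEC =====
-- Pre_ excludes exactly the inputs where Python A raises KeyError: an article missing the
-- 'topics' key, or with a nonempty topic list but no 'body' key.
def Pre_get_topic_word_data (articles : List (List (String × List String))) : Prop :=
  ∀ article ∈ articles,
    (PySem.Dict.mk article).contains "topics" = true ∧
    (((PySem.Dict.mk article).get? "topics").getD [] ≠ [] →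
      (PySem.Dict.mk article).contains "body" = true)
instance (articles : List (List (String × List String))) : Decidable (Pre_get_topic_word_data articles) := by unfold Pre_get_topic_word_data; infer_instance
def pvWitness_get_topic_word_data : (List (List (String × List String))) :=
  [[("topics", ["sport"]), ("body", ["ball", "goal", "ball"])]]

def Spec_get_topic_word_data (articles : List (List (String × List String))) (out : List (String × List (String × Int))) : Prop := out = get_topic_word_data_alt articles
instance (articles : List (List (String × List String))) (out : List (String × List (String × Int))) : Decidable (Spec_get_topic_word_data articles out) := by unfold Spec_get_topic_word_data; infer_instance

-- ===== CLAIM (what is proved, stated in full; the proofs are below) =====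
def Claim_equal_get_topic_word_data : Prop := ∀ (articles : List (List (String × List String))), Dom_get_topic_word_data articles → Pre_get_topic_word_data articles → Spec_get_topic_word_data articles (get_topic_word_data articles)

-- ===== LEMMAS AND PROOFS =====

-- foldl congruence under an invariant preserved by the left step.
theorem pv_foldl_inv {α β : Type} (P : β → Prop) (f g : β → α → β) (l : List α) (init : β)
    (h0 : P init) (hfg : ∀ acc x, P acc → f acc x = g acc x)
    (hP : ∀ acc x, P acc → P (f acc x)) :
    l.foldl f init = l.foldl g init := by
  induction l generalizing init with
  | nil => rfl
  | cons x t ih =>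
    simp only [List.foldl_cons]
    rw [← hfg init x h0, ih (f init x) (hP init x h0)]

-- a foldl preserves an invariant preserved by its step
theorem pv_foldl_pres {α β : Type} (P : β → Prop) (f : β → α → β) (l : List α) (init : β)
    (h0 : P init) (hP : ∀ acc x, P acc → P (f acc x)) : P (l.foldl f init) := by
  induction l generalizing init with
  | nil => exact h0
  | cons x t ih => exact ih (f init x) (hP init x h0)

-- inserting a key's current value is a no-op (keys unique, key present)
theorem pv_insert_getD_self {ν : Type} (d : PySem.Dict String ν) (k : String) (dflt : ν)
    (hnd : d.keys.Nodup) (hc : d.contains k = true) :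
    d.insert k (d.getD k dflt) = d := by
  apply PySem.Dict.ext
  rw [PySem.Dict.items_insert_of_contains d _ hc]
  conv_rhs => rw [← List.map_id d.items]
  apply List.map_congr_left
  rintro ⟨a, bv⟩ hp
  by_cases hk : a = k
  · subst hk
    have hget : d.get? a = some bv := PySem.Dict.get?_of_mem_items d hp hnd
    have hv : d.getD a dflt = bv := by simp [PySem.Dict.getD_eq_get?_getD, hget]
    simp [hv]
  · simp [hk]

-- A's word step is exactly "insert word (getD word 0 + 1)"
theorem pv_stepA_eq (inner : PySem.Dict String Int) (w : String) :
    (if inner.contains w then inner.modify w 0 (· + 1) else inner.insert w 1)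
      = inner.insert w (inner.getD w 0 + 1) := by
  by_cases h : inner.contains w = true
  · simp [h, PySem.Dict.modify]
  · have h' : inner.contains w = false := by simpa using h
    rw [PySem.Dict.getD_of_not_contains inner (k := w) 0 h']
    simp [h']

-- merging (k, g k) for distinct keys: pointwise value
theorem pv_getD_merge_keys (ks : List String) (g : String → Int) (b : PySem.Dict String Int)
    (v : String) (hnd : ks.Nodup) :
    (ks.foldl (fun b k => b.insert k (b.getD k 0 + g k)) b).getD v 0
      = b.getD v 0 + (if v ∈ ks then g v else 0) := by
  induction ks generalizing b with
  | nil => simp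
  | cons k t ih =>
    have hnd' : t.Nodup := hnd.of_cons
    simp only [List.foldl_cons]
    rw [ih _ hnd']
    by_cases hv : v = k
    · subst hv
      have hvn : v ∉ t := (List.nodup_cons.mp hnd).1
      simp [hvn, PySem.Dict.getD_insert_self]
    · rw [PySem.Dict.getD_insert_of_ne b _ _ hv]
      by_cases hm : v ∈ t <;> simp [hm, hv]

-- Set.update composes
theorem pv_set_update_update (xs : List String) : ∀ (s u : PySem.Set String),
    PySem.Set.update s (PySem.Set.update u xs) = PySem.Set.update (PySem.Set.update s u) xs := by
  induction xs with
  | nil => intro s u; rfl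
  | cons x t ih =>
    intro s u
    show PySem.Set.update s (PySem.Set.update (PySem.Set.add u x) t)
        = PySem.Set.update (PySem.Set.add (PySem.Set.update s u) x) t
    rw [ih]
    congr 1
    by_cases h : PySem.Set.contains u x = true
    · have hm : x ∈ u := by simpa [PySem.Set.contains] using h
      have hm' : x ∈ PySem.Set.update s u := (PySem.Set.mem_update s u x).mpr (Or.inr hm)
      simp [PySem.Set.add, PySem.Set.contains, hm, hm']
    · have hnm : x ∉ u := by simpa [PySem.Set.contains] using h
      show List.foldl PySem.Set.add s (PySem.Set.add u x)
          = PySem.Set.add (List.foldl PySem.Set.add s u) x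
      rw [show PySem.Set.add u x = u ++ [x] from by
        simp [PySem.Set.add, PySem.Set.contains, hnm]]
      rw [List.foldl_append]
      rfl

-- updating with the deduplicated list is updating with the list
theorem pv_set_update_ofList (s : PySem.Set String) (xs : List String) :
    PySem.Set.update s (PySem.Set.ofList xs) = PySem.Set.update s xs :=
  calc PySem.Set.update s (PySem.Set.ofList xs)
      = PySem.Set.update s (PySem.Set.update [] xs) := by rw [PySem.Set.ofList_eq_foldl]; rfl
    _ = PySem.Set.update (PySem.Set.update s []) xs := pv_set_update_update xs s []
    _ = PySem.Set.update s xs := rfl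

-- the counting fold over the body equals merging the counter of the body
theorem pv_count_fold_eq_merge (body : List String) (b : PySem.Dict String Int)
    (hnd : b.keys.Nodup) :
    body.foldl (fun b w => b.insert w (b.getD w 0 + 1)) b
      = (body.foldl (fun c w => c.insert w (c.getD w 0 + 1))
          (PySem.Dict.empty : PySem.Dict String Int)).items.foldl
          (fun b p => b.insert p.1 (b.getD p.1 0 + p.2)) b := by
  rw [show (body.foldl (fun c w => c.insert w (c.getD w 0 + 1))
      (PySem.Dict.empty : PySem.Dict String Int)) = PySem.Dict.counter body from
    PySem.Dict.foldl_insert_getD_add_one_eq_counter body]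
  rw [PySem.Dict.items_counter, List.foldl_map]
  have hndL : (body.foldl (fun b w => b.insert w (b.getD w 0 + 1)) b).keys.Nodup :=
    PySem.Dict.nodup_keys_foldl_insert body _ b hnd
  have hndR : ((PySem.Set.ofList body).foldl
      (fun b k => b.insert k (b.getD k 0 + (List.count k body : Int))) b).keys.Nodup :=
    PySem.Dict.nodup_keys_foldl_insert _ _ b hnd
  apply PySem.Dict.ext
  show (body.foldl (fun b w => b.insert w (b.getD w 0 + 1)) b).items
      = ((PySem.Set.ofList body).foldl
          (fun b k => b.insert k (b.getD k 0 + (List.count k body : Int))) b).items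
  rw [PySem.Dict.items_eq_map_keys _ hndL 0, PySem.Dict.items_eq_map_keys _ hndR 0,
    PySem.Dict.keys_foldl_insert, PySem.Dict.keys_foldl_insert, pv_set_update_ofList]
  apply List.map_congr_left
  intro v _
  rw [PySem.Dict.getD_foldl_insert_add_one,
    pv_getD_merge_keys _ _ _ _ (PySem.Set.nodup_ofList body)]
  by_cases hv : v ∈ body
  · simp [(PySem.Set.mem_ofList body v).mpr hv]
  · have h0 : List.count v body = 0 := List.count_eq_zero.mpr hv
    simp [hv, (PySem.Set.mem_ofList body v), h0]

-- hoisting the repeated data.insert topic out of the body loop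
theorem pv_hoist (body : List String) (data : PySem.Dict String (PySem.Dict String Int))
    (topic : String) (hnd : data.keys.Nodup) (hc : data.contains topic = true) :
    body.foldl (fun data w =>
        data.insert topic ((data.getD topic PySem.Dict.empty).insert w
          ((data.getD topic PySem.Dict.empty).getD w 0 + 1))) data
      = data.insert topic
          (body.foldl (fun b w => b.insert w (b.getD w 0 + 1)) (data.getD topic PySem.Dict.empty)) := by
  induction body generalizing data with
  | nil => exact (pv_insert_getD_self data topic _ hnd hc).symm
  | cons w t ih =>
    simp only [List.foldl_cons]
    rw [ih _ (PySem.Dict.nodup_keys_insert _ _ _ hnd) (PySem.Dict.contains_insert_self _ _ _),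
      PySem.Dict.getD_insert_self, PySem.Dict.insert_insert_self]

-- the data-dict invariant: unique topic keys, unique word keys in every bucket
def pvP (d : PySem.Dict String (PySem.Dict String Int)) : Prop :=
  d.keys.Nodup ∧ ∀ k, (d.getD k PySem.Dict.empty).keys.Nodup

-- proof-only names for A's and B's per-topic steps (exactly the ports' lambdas)
def pvAt (body : List String) (data : PySem.Dict String (PySem.Dict String Int)) (topic : String) :
    PySem.Dict String (PySem.Dict String Int) :=
  List.foldl (fun data word =>
      data.insert topic
        (if (data.getD topic PySem.Dict.empty).contains word = true then
          (data.getD topic PySem.Dict.empty).modify word 0 (· + 1)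
        else (data.getD topic PySem.Dict.empty).insert word 1))
    (if data.contains topic = true then data else data.insert topic PySem.Dict.empty) body

def pvBt (body : List String) (data : PySem.Dict String (PySem.Dict String Int)) (topic : String) :
    PySem.Dict String (PySem.Dict String Int) :=
  (if data.contains topic = true then data else data.insert topic PySem.Dict.empty).insert topic
    (List.foldl (fun b p => b.insert p.1 (b.getD p.1 0 + p.2))
      ((if data.contains topic = true then data else data.insert topic PySem.Dict.empty).getD topic
        PySem.Dict.empty)
      (List.foldl (fun c w => c.insert w (c.getD w 0 + 1)) PySem.Dict.empty body).items)

theorem pv_ensure_nodup (data : PySem.Dict String (PySem.Dict String Int)) (topic : String)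
    (hP : pvP data) :
    pvP (if data.contains topic = true then data else data.insert topic PySem.Dict.empty) := by
  obtain ⟨h1, h2⟩ := hP
  split
  · exact ⟨h1, h2⟩
  · refine ⟨PySem.Dict.nodup_keys_insert _ _ _ h1, fun k => ?_⟩
    rw [PySem.Dict.getD_insert]
    split
    · simp [PySem.Dict.keys, PySem.Dict.empty]
    · exact h2 k

theorem pv_ensure_contains (data : PySem.Dict String (PySem.Dict String Int)) (topic : String) :
    (if data.contains topic = true then data else data.insert topic PySem.Dict.empty).contains topic = true := by
  split
  · assumption
  · exact PySem.Dict.contains_insert_self _ _ _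

theorem pv_topic_eq (body : List String) (data : PySem.Dict String (PySem.Dict String Int))
    (topic : String) (hP : pvP data) : pvAt body data topic = pvBt body data topic := by
  unfold pvAt pvBt
  have hP' := pv_ensure_nodup data topic hP
  have hfun : (fun (data : PySem.Dict String (PySem.Dict String Int)) (word : String) =>
      data.insert topic
        (if (data.getD topic PySem.Dict.empty).contains word = true then
          (data.getD topic PySem.Dict.empty).modify word 0 (· + 1)
        else (data.getD topic PySem.Dict.empty).insert word 1))
      = fun data word => data.insert topic ((data.getD topic PySem.Dict.empty).insert word
          ((data.getD topic PySem.Dict.empty).getD word 0 + 1)) := by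
    funext d w; rw [pv_stepA_eq]
  rw [hfun, pv_hoist body _ topic hP'.1 (pv_ensure_contains data topic),
    pv_count_fold_eq_merge body _ (hP'.2 topic)]

theorem pv_topic_pres (body : List String) (data : PySem.Dict String (PySem.Dict String Int))
    (topic : String) (hP : pvP data) : pvP (pvAt body data topic) := by
  rw [pv_topic_eq body data topic hP]
  unfold pvBt
  have hP' := pv_ensure_nodup data topic hP
  refine ⟨PySem.Dict.nodup_keys_insert _ _ _ hP'.1, fun k => ?_⟩
  rw [PySem.Dict.getD_insert]
  split
  · exact PySem.Dict.nodup_keys_foldl_insert_key _ Prod.fst _ _ (hP'.2 topic)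
  · exact hP'.2 k

theorem pv_article_eq (topics body : List String) (data : PySem.Dict String (PySem.Dict String Int))
    (hP : pvP data) :
    List.foldl (pvAt body) data topics
      = if topics.isEmpty = true then data else List.foldl (pvBt body) data topics := by
  cases topics with
  | nil => rfl
  | cons t ts =>
    rw [if_neg (by simp)]
    exact pv_foldl_inv pvP _ _ _ _ hP (fun _ _ h => pv_topic_eq _ _ _ h)
      (fun _ _ h => pv_topic_pres _ _ _ h)

theorem pv_article_pres (topics body : List String) (data : PySem.Dict String (PySem.Dict String Int))
    (hP : pvP data) : pvP (List.foldl (pvAt body) data topics) :=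
  pv_foldl_pres pvP _ _ _ hP (fun _ _ h => pv_topic_pres _ _ _ h)

theorem pv_main (articles : List (List (String × List String))) :
    get_topic_word_data articles = get_topic_word_data_alt articles := by
  unfold get_topic_word_data get_topic_word_data_alt
  simp only []
  apply congrArg (fun (d : PySem.Dict String (PySem.Dict String Int)) => d.items.map (fun p => (p.1, p.2.items)))
  apply pv_foldl_inv pvP
  · exact ⟨by simp [PySem.Dict.keys, PySem.Dict.empty], fun k => by rw [PySem.Dict.getD_empty]; simp [PySem.Dict.keys, PySem.Dict.empty]⟩
  · intro acc article hP
    exact pv_article_eq _ _ acc hP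
  · intro acc article hP
    exact pv_article_pres _ _ acc hP

-- ===== VERDICT (by name: the statement is the Claim_ definition above) =====
theorem get_topic_word_data_spec : Claim_equal_get_topic_word_data := by
  intro articles _ _
  unfold Spec_get_topic_word_data
  exact pv_main articles
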